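-- pv_equiv track=rewrite | github.com/pkrezel/tools_PKL | basic.py | get_increase_value_from_L
-- ===== SOURCE A (Python) =====
-- def get_increase_value_from_L(L):
--     d=0
--     v1=L[0]
--     for v2 in L[1:]:
--         if v2 > v1:
--             d += v2-v1
--         v1=v2
--     return d
-- ===== SOURCE B (Python) =====
-- def get_increase_value_from_L(L):
--     # valley-peak walk: find each local valley and the following peak,
--     # add peak - valley; empty list returns 0 (A raises IndexError there).
--     total = 0
--     n = len(L)
--     i = 0
--     while i < n - 1:
--         while i < n - 1 and L[i + 1] <= L[i]:
--             i += 1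
--         valley = i
--         while i < n - 1 and L[i + 1] > L[i]:
--             i += 1
--         total += L[i] - L[valley]
--     return total
-- ===== Notes on version B (the rewrite author's own statement) =====
-- stated objective: alternative
-- what changed: Replaces A's single pairwise fold accumulating positive consecutive differences by a valley-peak index walk that skips to each local valley, climbs to the following peak, and adds peak minus valley.
-- outside the precondition, e.g. on get_increase_value_from_L([]): A raises IndexError, B returns 0
import Mathlib
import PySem

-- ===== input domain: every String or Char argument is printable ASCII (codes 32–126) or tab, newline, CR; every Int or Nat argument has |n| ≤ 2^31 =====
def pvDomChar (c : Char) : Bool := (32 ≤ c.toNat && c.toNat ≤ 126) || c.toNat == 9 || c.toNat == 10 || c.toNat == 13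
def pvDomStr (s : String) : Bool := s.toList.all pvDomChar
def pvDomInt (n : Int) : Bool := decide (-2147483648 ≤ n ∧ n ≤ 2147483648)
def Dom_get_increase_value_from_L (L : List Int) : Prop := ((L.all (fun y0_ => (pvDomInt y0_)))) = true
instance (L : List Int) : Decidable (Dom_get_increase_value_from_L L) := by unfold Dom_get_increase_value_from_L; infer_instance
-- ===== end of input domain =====

-- B replaces A's pairwise positive-difference fold by a valley-peak index walk (alternative
-- decomposition, same O(n) cost); equal return values proved on every nonempty list.

-- ===== PORT A =====
-- d=0; v1=L[0]; for v2 in L[1:]: if v2>v1: d+=v2-v1; v1=v2; return d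
def get_increase_value_from_L (L : List Int) : Int :=
  match PySem.List.pyGet? L 0 with
  | none => 0   -- IndexError in Python; excluded by Pre_
  | some v1 =>
    ((PySem.List.slice L (some 1) none).foldl
      (fun (st : Int × Int) v2 =>
        (if v2 > st.2 then st.1 + (v2 - st.2) else st.1, v2)) (0, v1)).1

-- ===== PORT B =====
-- inner while: while i < n-1 and L[i+1] <= L[i]: i += 1   (fuel n suffices: i < n throughout)
def pvSkip (L : List Int) (n : Nat) : Nat → Nat → Nat
  | 0, i => i
  | fuel + 1, i =>
    if i < n - 1 ∧ L.getD (i + 1) 0 ≤ L.getD i 0 then pvSkip L n fuel (i + 1) else i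

-- inner while: while i < n-1 and L[i+1] > L[i]: i += 1
def pvClimb (L : List Int) (n : Nat) : Nat → Nat → Nat
  | 0, i => i
  | fuel + 1, i =>
    if i < n - 1 ∧ L.getD i 0 < L.getD (i + 1) 0 then pvClimb L n fuel (i + 1) else i

-- outer while: skip to valley, climb to peak, add peak - valley
def pvOuter (L : List Int) (n : Nat) : Nat → Nat → Int → Int
  | 0, _, total => total
  | fuel + 1, i, total =>
    if i < n - 1 then
      let j := pvSkip L n n i
      let k := pvClimb L n n j
      pvOuter L n fuel k (total + (L.getD k 0 - L.getD j 0))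
    else total

def get_increase_value_from_L_alt (L : List Int) : Int :=
  pvOuter L L.length L.length 0 0

-- ===== PRECONDITION & SPEC =====
-- Pre_ excludes exactly the empty list, on which A raises IndexError (L[0]).
def Pre_get_increase_value_from_L (L : List Int) : Prop := L ≠ []
instance (L : List Int) : Decidable (Pre_get_increase_value_from_L L) := by
  unfold Pre_get_increase_value_from_L; infer_instance
def pvWitness_get_increase_value_from_L : List Int := [1, 5, 3, 4]

def Spec_get_increase_value_from_L (L : List Int) (out : Int) : Prop := out = get_increase_value_from_L_alt L
instance (L : List Int) (out : Int) : Decidable (Spec_get_increase_value_from_L L out) := by unfold Spec_get_increase_value_from_L; infer_instance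

-- ===== CLAIM (what is proved, stated in full; the proofs are below) =====
def Claim_equal_get_increase_value_from_L : Prop := ∀ (L : List Int), Dom_get_increase_value_from_L L → Pre_get_increase_value_from_L L → Spec_get_increase_value_from_L L (get_increase_value_from_L L)

-- ===== LEMMAS AND PROOFS =====

-- reference function: sum of positive consecutive increases starting from v
def pvF : Int → List Int → Int
  | _, [] => 0
  | v, x :: xs => (if v < x then x - v else 0) + pvF x xs

theorem pvA_foldl (rest : List Int) : ∀ (d v : Int),
    (rest.foldl (fun (st : Int × Int) v2 =>
      (if v2 > st.2 then st.1 + (v2 - st.2) else st.1, v2)) (d, v)).1 = d + pvF v rest := by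
  induction rest with
  | nil => intro d v; simp [pvF]
  | cons x xs ih =>
    intro d v
    simp only [List.foldl, pvF, ih]
    split_ifs with h
    · ring
    · ring

theorem pvA_eq (v : Int) (rest : List Int) :
    get_increase_value_from_L (v :: rest) = pvF v rest := by
  simp [get_increase_value_from_L, PySem.List.slice_from_one, pvA_foldl]

-- F i = pvF L[i] (drop (i+1) L), the remaining increase from position i
def pvG (L : List Int) (i : Nat) : Int := pvF (L.getD i 0) (L.drop (i + 1))

theorem pvDrop_cons (L : List Int) (i : Nat) (h : i < L.length) :
    L.drop i = L.getD i 0 :: L.drop (i + 1) := by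
  rw [List.drop_eq_getElem_cons h, List.getD_eq_getElem L 0 h]

theorem pvG_step (L : List Int) (i : Nat) (h : i + 1 < L.length) :
    pvG L i = (if L.getD i 0 < L.getD (i + 1) 0 then L.getD (i + 1) 0 - L.getD i 0 else 0)
      + pvG L (i + 1) := by
  unfold pvG
  rw [pvDrop_cons L (i + 1) h]
  simp [pvF]

theorem pvSkip_spec (L : List Int) (fuel : Nat) : ∀ i, i < L.length →
    let j := pvSkip L L.length fuel i
    i ≤ j ∧ j < L.length ∧ pvG L j = pvG L i ∧
      (L.length - 1 - i ≤ fuel → ¬ (j < L.length - 1 ∧ L.getD (j + 1) 0 ≤ L.getD j 0)) := by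
  induction fuel with
  | zero =>
    intro i hi
    refine ⟨le_refl _, hi, rfl, ?_⟩
    intro hf hc
    simp only [pvSkip] at hc
    exact absurd hc.1 (by omega)
  | succ fuel ih =>
    intro i hi
    simp only [pvSkip]
    split_ifs with hc
    · have hi1 : i + 1 < L.length := by omega
      obtain ⟨h1, h2, h3, h4⟩ := ih (i + 1) hi1
      refine ⟨by omega, h2, ?_, fun hf => h4 (by omega)⟩
      rw [h3, pvG_step L i hi1]
      have hnlt : ¬ L.getD i 0 < L.getD (i + 1) 0 := by omega
      rw [if_neg hnlt]; ring
    · exact ⟨le_refl _, hi, rfl, fun _ => hc⟩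

theorem pvClimb_spec (L : List Int) (fuel : Nat) : ∀ j, j < L.length →
    let k := pvClimb L L.length fuel j
    j ≤ k ∧ k < L.length ∧ pvG L j = (L.getD k 0 - L.getD j 0) + pvG L k ∧
      (1 ≤ fuel → (j < L.length - 1 ∧ L.getD j 0 < L.getD (j + 1) 0) → j + 1 ≤ k) := by
  induction fuel with
  | zero =>
    intro j hj
    simp only [pvClimb]
    exact ⟨le_refl _, hj, by ring, by omega⟩
  | succ fuel ih =>
    intro j hj
    simp only [pvClimb]
    split_ifs with hc
    · have hj1 : j + 1 < L.length := by omega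
      obtain ⟨h1, h2, h3, _⟩ := ih (j + 1) hj1
      refine ⟨by omega, h2, ?_, fun _ _ => by omega⟩
      rw [pvG_step L j hj1, h3]
      have : L.getD j 0 < L.getD (j + 1) 0 := hc.2
      simp only [this, if_pos]
      ring
    · refine ⟨le_refl _, hj, by ring, ?_⟩
      intro _ hcc; exact absurd hcc hc

theorem pvOuter_spec (L : List Int) (fuel : Nat) : ∀ (i : Nat) (total : Int),
    i < L.length → L.length - 1 - i ≤ fuel →
    pvOuter L L.length fuel i total = total + pvG L i := by
  induction fuel with
  | zero =>
    intro i total hi hf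
    have : i = L.length - 1 := by omega
    subst this
    have hd : L.drop (L.length - 1 + 1) = ([] : List Int) := by
      apply List.drop_eq_nil_of_le; omega
    simp [pvOuter, pvG, hd, pvF]
  | succ fuel ih =>
    intro i total hi hf
    simp only [pvOuter]
    split_ifs with hc
    · obtain ⟨hj1, hj2, hj3, hj4⟩ := pvSkip_spec L L.length i hi
      set j := pvSkip L L.length L.length i with hjdef
      obtain ⟨hk1, hk2, hk3, hk4⟩ := pvClimb_spec L L.length j hj2
      set k := pvClimb L L.length L.length j with hkdef
      have hnostop := hj4 (by omega)
      have hik : i + 1 ≤ k := by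
        by_cases hji : j = i
        · have hlt : L.getD j 0 < L.getD (j + 1) 0 := by
            by_contra hle
            exact hnostop ⟨by omega, by omega⟩
          have := hk4 (by omega) ⟨by omega, hlt⟩
          omega
        · omega
      rw [ih k _ hk2 (by omega), ← hj3, hk3]
      ring
    · have : i = L.length - 1 := by omega
      subst this
      have hd : L.drop (L.length - 1 + 1) = ([] : List Int) := by
        apply List.drop_eq_nil_of_le; omega
      simp [pvG, hd, pvF]

theorem pvB_eq (v : Int) (rest : List Int) :
    get_increase_value_from_L_alt (v :: rest) = pvF v rest := by
  unfold get_increase_value_from_L_alt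
  rw [pvOuter_spec (v :: rest) (v :: rest).length 0 0 (by simp) (by omega)]
  simp [pvG]

-- ===== VERDICT (by name: the statement is the Claim_ definition above) =====
theorem get_increase_value_from_L_spec : Claim_equal_get_increase_value_from_L := by
  intro L _ hpre
  match L, hpre with
  | v :: rest, _ =>
    show get_increase_value_from_L (v :: rest) = get_increase_value_from_L_alt (v :: rest)
    rw [pvA_eq, pvB_eq]
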